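-- pv_equiv track=rewrite | github.com/sandeepkrishnagopalappa/p | Python_Coding_Exercise/_python_coding_problems.py | lstrip
-- ===== SOURCE A (Python) =====
-- def lstrip(iterable, strip_value):
--     """Return iterable with strip_value items removed from beginning."""
--     stripped = []
--     is_beginning = True
--     for item in iterable:
--         if is_beginning and item == strip_value:
--             continue
--         is_beginning = False
--         stripped.append(item)
--     return stripped
-- ===== SOURCE B (Python) =====
-- def lstrip(iterable, strip_value):
--     lst = list(iterable)
--     i = 0
--     while i < len(lst) and lst[i] == strip_value:
--         i += 1
--     return lst[i:]
-- ===== Notes on version B (the rewrite author's own statement) =====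
-- stated objective: alternative
-- what changed: Replaces the flag-guarded per-item append loop with a boundary search (advance an index past leading strip_value items) followed by a single slice of the materialized list.
import Mathlib
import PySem

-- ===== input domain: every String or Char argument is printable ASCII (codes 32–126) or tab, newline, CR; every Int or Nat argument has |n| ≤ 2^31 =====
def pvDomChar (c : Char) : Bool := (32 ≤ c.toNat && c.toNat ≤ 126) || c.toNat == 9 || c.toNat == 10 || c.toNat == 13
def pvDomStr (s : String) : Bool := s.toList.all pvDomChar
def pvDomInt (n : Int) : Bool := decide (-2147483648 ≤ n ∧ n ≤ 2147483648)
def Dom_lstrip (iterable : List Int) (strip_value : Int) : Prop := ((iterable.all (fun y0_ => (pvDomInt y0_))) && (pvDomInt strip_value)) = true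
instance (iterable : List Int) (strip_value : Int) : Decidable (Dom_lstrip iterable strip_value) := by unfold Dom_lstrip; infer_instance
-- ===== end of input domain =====

-- B replaces A's flag-guarded per-item append loop with a boundary search plus a single slice (alternative decomposition, same cost).


-- ===== PORT A =====
-- for item in iterable: if is_beginning and item == strip_value: continue; is_beginning = False; stripped.append(item)
def lstrip (iterable : List Int) (strip_value : Int) : List Int :=
  (iterable.foldl
    (fun (st : List Int × Bool) item =>
      if st.2 && (item == strip_value) then st
      else (st.1 ++ [item], false))
    ([], true)).1

-- ===== PORT B =====
-- i = 0; while i < len(lst) and lst[i] == strip_value: i += 1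
def lstripBoundary : List Int → Int → Nat
  | [], _ => 0
  | x :: xs, s => if x == s then lstripBoundary xs s + 1 else 0

-- return lst[i:]
def lstrip_alt (iterable : List Int) (strip_value : Int) : List Int :=
  PySem.List.slice iterable (some ((lstripBoundary iterable strip_value : Nat) : Int)) none

-- ===== PRECONDITION & SPEC =====
def Spec_lstrip (iterable : List Int) (strip_value : Int) (out : List Int) : Prop := out = lstrip_alt iterable strip_value
instance (iterable : List Int) (strip_value : Int) (out : List Int) : Decidable (Spec_lstrip iterable strip_value out) := by unfold Spec_lstrip; infer_instance

-- ===== CLAIM (what is proved, stated in full; the proofs are below) =====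
def Claim_equal_lstrip : Prop := ∀ (iterable : List Int) (strip_value : Int), Dom_lstrip iterable strip_value → Spec_lstrip iterable strip_value (lstrip iterable strip_value)

-- ===== LEMMAS AND PROOFS =====

-- Once is_beginning is False, A's fold just appends every remaining item.
lemma lstrip_fold_false (xs : List Int) (s : Int) (acc : List Int) :
    (xs.foldl
      (fun (st : List Int × Bool) item =>
        if st.2 && (item == s) then st
        else (st.1 ++ [item], false))
      (acc, false)).1 = acc ++ xs := by
  induction xs generalizing acc with
  | nil => simp [List.foldl]
  | cons x xs ih =>
    rw [List.foldl_cons, if_neg (by simp)]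
    rw [ih]; simp

lemma lstrip_eq_drop (xs : List Int) (s : Int) :
    lstrip xs s = xs.drop (lstripBoundary xs s) := by
  induction xs with
  | nil => simp [lstrip, lstripBoundary]
  | cons x xs ih =>
    by_cases h : x = s
    · simpa [lstrip, lstripBoundary, List.foldl, h] using ih
    · unfold lstrip
      rw [List.foldl_cons, if_neg (by simp [h]), lstrip_fold_false]
      simp [lstripBoundary, h]

-- ===== VERDICT (by name: the statement is the Claim_ definition above) =====
theorem lstrip_spec : Claim_equal_lstrip := by
  intro it s _
  unfold Spec_lstrip lstrip_alt
  rw [PySem.List.slice_from_natCast, lstrip_eq_drop]
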